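-- pv_equiv track=rewrite | github.com/Slin58/naolympics | tictactoe_tactic/main.py | setPointx
-- ===== SOURCE A (Python) =====
-- def setPointx(field, place):
--     counter = 0
--     for i in range(0, len(field)):
--         for j in range(0, len(field)):
--             if counter == place:
--                 field[i][j] = 'o'
--             counter += 1
--
--     return field
-- ===== SOURCE B (Python) =====
-- def setPointx(field, place):
--     n = len(field)
--     if 0 <= place < n * n:
--         field[place // n][place % n] = 'o'
--     return field
-- ===== Notes on version B (the rewrite author's own statement) =====
-- stated objective: simpler
-- what changed: Replaces the nested counter scan over all n*n cells with one direct assignment at field[place//n][place%n] guarded by 0 <= place < n*n.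
import Mathlib
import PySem

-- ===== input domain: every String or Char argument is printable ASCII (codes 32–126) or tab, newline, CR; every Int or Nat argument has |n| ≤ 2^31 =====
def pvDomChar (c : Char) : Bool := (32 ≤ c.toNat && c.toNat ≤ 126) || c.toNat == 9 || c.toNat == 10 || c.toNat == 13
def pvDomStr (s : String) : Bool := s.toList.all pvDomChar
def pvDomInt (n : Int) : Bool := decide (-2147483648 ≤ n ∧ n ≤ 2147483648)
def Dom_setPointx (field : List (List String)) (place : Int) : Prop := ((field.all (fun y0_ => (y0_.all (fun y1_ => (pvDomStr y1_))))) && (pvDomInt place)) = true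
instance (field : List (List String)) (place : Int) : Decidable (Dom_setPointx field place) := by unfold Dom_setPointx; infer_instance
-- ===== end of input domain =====

-- B replaces A's nested counter scan by one direct assignment at (place//n, place%n) (simpler);
-- both Pythons mutate `field` in place the same way; the theorems are about the return value.

-- ===== PORT A =====
-- literal transliteration: counter threaded through the nested loops, assignment when counter == place
def setPointx (field : List (List String)) (place : Int) : List (List String) :=
  (List.range field.length).foldl (fun (st : Int × List (List String)) i =>
    (List.range field.length).foldl (fun (st : Int × List (List String)) j =>
      let f' := if st.1 = place then st.2.modify i (fun row => row.set j "o") else st.2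
      (st.1 + 1, f')) st) (0, field) |>.2

-- ===== PORT B =====
def setPointx_alt (field : List (List String)) (place : Int) : List (List String) :=
  let n : Int := field.length
  if 0 ≤ place ∧ place < n * n then
    field.modify (PySem.Int.floordiv place n).toNat
      (fun row => row.set (PySem.Int.mod place n).toNat "o")
  else field

-- ===== PRECONDITION & SPEC =====
-- Pre_ excludes exactly the inputs on which Python A raises IndexError: place hits the grid
-- (0 ≤ place < n*n) but row place//n is shorter than place%n+1. (Python B raises there too.)
def Pre_setPointx (field : List (List String)) (place : Int) : Prop :=
  0 ≤ place → place < (field.length : Int) * field.length →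
    place.toNat % field.length < (field.getD (place.toNat / field.length) []).length
instance (field : List (List String)) (place : Int) : Decidable (Pre_setPointx field place) := by unfold Pre_setPointx; infer_instance
def pvWitness_setPointx : List (List String) × Int := ([["x"]], 0)
def Spec_setPointx (field : List (List String)) (place : Int) (out : List (List String)) : Prop := out = setPointx_alt field place
instance (field : List (List String)) (place : Int) (out : List (List String)) : Decidable (Spec_setPointx field place out) := by unfold Spec_setPointx; infer_instance

-- ===== CLAIM (what is proved, stated in full; the proofs are below) =====
def Claim_equal_setPointx : Prop := ∀ (field : List (List String)) (place : Int), Dom_setPointx field place → Pre_setPointx field place → Spec_setPointx field place (setPointx field place)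

-- ===== LEMMAS AND PROOFS =====

/-- inner loop of A: counter advances by k, and the assignment happens iff `place`
    falls in the counter window `[c, c+k)`, at column `place - c`. -/
theorem pv_inner (place : Int) (i : Nat) : ∀ (k : Nat) (c : Int) (f : List (List String)),
    (List.range k).foldl (fun (st : Int × List (List String)) j =>
      let f' := if st.1 = place then st.2.modify i (fun row => row.set j "o") else st.2
      (st.1 + 1, f')) (c, f)
    = (c + k, if c ≤ place ∧ place < c + k
        then f.modify i (fun row => row.set (place - c).toNat "o") else f) := by
  intro k
  induction k with
  | zero => intro c f; simp
  | succ k ih =>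
    intro c f
    rw [List.range_succ, List.foldl_append, ih]
    simp only [List.foldl_cons, List.foldl_nil]
    by_cases h1 : c ≤ place ∧ place < c + k
    · have hne : ¬ (c + (k : Int) = place) := by omega
      have hcond : c ≤ place ∧ place < c + ((k + 1 : Nat) : Int) := by push_cast; omega
      simp only [if_pos h1, if_neg hne, if_pos hcond, Prod.mk.injEq]
      exact ⟨by push_cast; omega, by trivial⟩
    · by_cases h2 : c + (k : Int) = place
      · have hcond : c ≤ place ∧ place < c + ((k + 1 : Nat) : Int) := by push_cast; omega
        have hk : (place - c).toNat = k := by omega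
        simp only [if_neg h1, if_pos h2, if_pos hcond, hk, Prod.mk.injEq]
        exact ⟨by push_cast; omega, by trivial⟩
      · have hcond : ¬ (c ≤ place ∧ place < c + ((k + 1 : Nat) : Int)) := by push_cast; omega
        simp only [if_neg h1, if_neg h2, if_neg hcond, Prod.mk.injEq]
        exact ⟨by push_cast; omega, by trivial⟩

/-- outer loop of A over the first m rows, started at counter 0. -/
theorem pv_outer (place : Int) (field : List (List String)) : ∀ (m : Nat),
    (List.range m).foldl (fun (st : Int × List (List String)) i =>
      (List.range field.length).foldl (fun (st : Int × List (List String)) j =>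
        let f' := if st.1 = place then st.2.modify i (fun row => row.set j "o") else st.2
        (st.1 + 1, f')) st) (0, field)
    = (((m * field.length : Nat) : Int), if 0 ≤ place ∧ place < (m * field.length : Nat)
        then field.modify (place.toNat / field.length)
              (fun row => row.set (place.toNat % field.length) "o") else field) := by
  set n := field.length with hn
  intro m
  induction m with
  | zero => simp
  | succ m ih =>
    have hmulZ : (((m + 1) * n : Nat) : Int) = ((m * n : Nat) : Int) + n := by push_cast; ring
    rw [List.range_succ, List.foldl_append, ih]
    simp only [List.foldl_cons, List.foldl_nil]
    by_cases h1 : 0 ≤ place ∧ place < ((m * n : Nat) : Int)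
    · have hin : ¬ (((m * n : Nat) : Int) ≤ place ∧ place < ((m * n : Nat) : Int) + n) := by omega
      have hcond : 0 ≤ place ∧ place < (((m + 1) * n : Nat) : Int) := by omega
      rw [if_pos h1, pv_inner]
      simp only [if_neg hin, if_pos hcond, Prod.mk.injEq]
      exact ⟨by push_cast; ring, by trivial⟩
    · by_cases h2 : ((m * n : Nat) : Int) ≤ place ∧ place < ((m * n : Nat) : Int) + n
      · have hp0 : 0 ≤ place := le_trans (by positivity) h2.1
        have hnpos : 0 < n := by
          have : (0 : Int) < (n : Int) := by omega
          exact_mod_cast this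
        have hlo : m * n ≤ place.toNat := by omega
        have hhi : place.toNat < (m + 1) * n := by omega
        have hdiv : place.toNat / n = m := Nat.div_eq_of_lt_le hlo hhi
        have hmod : place.toNat % n = place.toNat - m * n := by
          conv_lhs => rw [Nat.mod_eq_sub_div_mul]
          rw [hdiv]
        have hcol : (place - ((m * n : Nat) : Int)).toNat = place.toNat % n := by omega
        have hcond : 0 ≤ place ∧ place < (((m + 1) * n : Nat) : Int) := by omega
        rw [if_neg h1, pv_inner]
        simp only [if_pos h2, if_pos hcond, hcol, hdiv, Prod.mk.injEq]
        exact ⟨by push_cast; ring, by trivial⟩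
      · have hcond : ¬ (0 ≤ place ∧ place < (((m + 1) * n : Nat) : Int)) := by omega
        rw [if_neg h1, pv_inner]
        simp only [if_neg h2, if_neg hcond, Prod.mk.injEq]
        exact ⟨by push_cast; ring, by trivial⟩

-- ===== VERDICT (by name: the statement is the Claim_ definition above) =====
theorem setPointx_spec : Claim_equal_setPointx := by
  intro field place _ _
  unfold Spec_setPointx setPointx
  rw [pv_outer]
  simp only [setPointx_alt]
  by_cases h : 0 ≤ place ∧ place < (field.length : Int) * field.length
  · have h' : 0 ≤ place ∧ place < ((field.length * field.length : Nat) : Int) := by push_cast; exact h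
    rw [if_pos h', if_pos h]
    have hp : place = ((place.toNat : Nat) : Int) := by omega
    rw [hp, PySem.Int.floordiv_natCast, PySem.Int.mod_natCast]
    simp only [Int.toNat_natCast]
  · have h' : ¬ (0 ≤ place ∧ place < ((field.length * field.length : Nat) : Int)) := by push_cast; exact h
    rw [if_neg h', if_neg h]
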